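-- pv_equiv track=rewrite | github.com/coollabsio/coolify | templates/Epicyon/epicyon-data/blocking.py | contains_military_domain
-- ===== SOURCE A (Python) =====
-- def get_mil_domains_list() -> []:
--     """returns a list of military domains
--     """
--     return ('army', 'navy', 'airforce', 'mil',
--             'sncorp.com', 'sierranevadacorp.us', 'ncontext.com')
--
-- def contains_military_domain(message_str: str) -> bool:
--     """Returns true if the given string contains a military domain
--     """
--     mil_domains = get_mil_domains_list()
--     for domain_str in mil_domains:
--         if '.' not in domain_str:
--             tld = domain_str
--             if '.' + tld + '"' in message_str or \
--                '.' + tld + '/' in message_str: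
--                 return True
--         else:
--             if domain_str + '"' in message_str or \
--                domain_str + '/' in message_str:
--                 return True
--     return False
-- ===== SOURCE B (Python) =====
-- def contains_military_domain(message_str: str) -> bool:
--     """Returns true if the given string contains a military domain.
--
--     Single left-to-right scan: at every '"' or '/' delimiter, check whether
--     the text before it ends with one of the military domain suffixes.
--     """
--     suffixes = ('.army', '.navy', '.airforce', '.mil',
--                 'sncorp.com', 'sierranevadacorp.us', 'ncontext.com')
--     for i, ch in enumerate(message_str):
--         if (ch == '"' or ch == '/') and message_str[:i].endswith(suffixes):
--             return True
--     return False
-- ===== Notes on version B (the rewrite author's own statement) =====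
-- stated objective: alternative
-- what changed: Instead of looping over the 7 domains and running two substring-membership searches per domain (14 scans of the message), B makes one left-to-right scan over the message, and at each '"' or '/' delimiter tests whether the preceding text ends with one of the 7 military-domain suffixes.
import Mathlib
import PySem

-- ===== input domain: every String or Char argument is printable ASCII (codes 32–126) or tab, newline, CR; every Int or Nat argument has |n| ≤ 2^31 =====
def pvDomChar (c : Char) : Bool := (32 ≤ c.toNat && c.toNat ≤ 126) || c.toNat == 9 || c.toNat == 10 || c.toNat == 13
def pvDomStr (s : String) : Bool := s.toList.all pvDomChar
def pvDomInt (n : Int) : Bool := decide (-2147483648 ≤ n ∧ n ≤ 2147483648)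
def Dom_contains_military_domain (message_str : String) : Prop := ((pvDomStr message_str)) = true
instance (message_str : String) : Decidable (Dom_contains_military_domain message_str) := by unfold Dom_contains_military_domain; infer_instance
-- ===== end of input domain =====

-- B replaces A's loop over 7 domains with 14 substring searches by ONE left-to-right
-- scan of the message that tests, at each '"'/'/' delimiter, whether the preceding
-- text ends with one of the 7 military-domain suffixes (objective: alternative).

-- ===== PORT A =====
-- get_mil_domains_list()
def pvMilDomains : List (List Char) :=
  ["army".toList, "navy".toList, "airforce".toList, "mil".toList,
   "sncorp.com".toList, "sierranevadacorp.us".toList, "ncontext.com".toList]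

-- the 'for domain_str in mil_domains' loop with its early returns
def pvMilLoop : List (List Char) → List Char → Bool
  | [], _ => false
  | domain :: rest, msg =>
    if !(PySem.Chars.isIn ['.'] domain) then
      if PySem.Chars.isIn (['.'] ++ domain ++ ['"']) msg ||
         PySem.Chars.isIn (['.'] ++ domain ++ ['/']) msg then true
      else pvMilLoop rest msg
    else
      if PySem.Chars.isIn (domain ++ ['"']) msg ||
         PySem.Chars.isIn (domain ++ ['/']) msg then true
      else pvMilLoop rest msg

def contains_military_domain (message_str : String) : Bool :=
  pvMilLoop pvMilDomains message_str.toList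

-- ===== PORT B =====
-- the suffixes tuple of Source B
def pvSuffixes : List (List Char) :=
  [".army".toList, ".navy".toList, ".airforce".toList, ".mil".toList,
   "sncorp.com".toList, "sierranevadacorp.us".toList, "ncontext.com".toList]

-- Source B's 'for i, ch in enumerate(message_str)' scan; pre is message_str[:i]
def pvAltLoop : List Char → List Char → Bool
  | _, [] => false
  | pre, c :: cs =>
    if (c == '"' || c == '/') && pvSuffixes.any (fun t => PySem.Chars.endswith pre t) then
      true
    else pvAltLoop (pre ++ [c]) cs

def contains_military_domain_alt (message_str : String) : Bool :=
  pvAltLoop [] message_str.toList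

-- ===== PRECONDITION & SPEC =====
def Spec_contains_military_domain (message_str : String) (out : Bool) : Prop := out = contains_military_domain_alt message_str
instance (message_str : String) (out : Bool) : Decidable (Spec_contains_military_domain message_str out) := by unfold Spec_contains_military_domain; infer_instance

-- ===== CLAIM (what is proved, stated in full; the proofs are below) =====
def Claim_equal_contains_military_domain : Prop := ∀ (message_str : String), Dom_contains_military_domain message_str → Spec_contains_military_domain message_str (contains_military_domain message_str)

-- ===== LEMMAS AND PROOFS =====

-- a needle of the form t ++ [d] occurs in s iff some position i holds d and t ends s.take i
theorem pv_infix_snoc_iff (t : List Char) (d : Char) (s : List Char) :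
    (t ++ [d]) <:+: s ↔ ∃ i, s[i]? = some d ∧ t <:+ s.take i := by
  constructor
  · rintro ⟨u, v, rfl⟩
    refine ⟨u.length + t.length, ?_, ?_⟩
    · have : u ++ (t ++ [d]) ++ v = (u ++ t) ++ (d :: v) := by simp
      rw [this, List.getElem?_append_right (by simp)]
      simp
    · have : u ++ (t ++ [d]) ++ v = (u ++ t) ++ (d :: v) := by simp
      rw [this, List.take_append_of_le_length (by simp)]
      simp [List.take_of_length_le, List.suffix_append]
  · rintro ⟨i, hget, w, hw⟩
    have hi : i < s.length := by
      by_contra h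
      rw [List.getElem?_eq_none (by omega)] at hget
      simp at hget
    have hd : s[i] = d := by
      rw [List.getElem?_eq_getElem hi] at hget
      exact Option.some.inj hget
    refine ⟨w, s.drop (i+1), ?_⟩
    have h2 := List.drop_eq_getElem_cons hi
    have : s = s.take i ++ s.drop i := (List.take_append_drop i s).symm
    rw [h2, hd, ← hw] at this
    conv_rhs => rw [this]
    simp

-- the four dot-less and three dotted domains of A's literal list
theorem pv_dotless : (PySem.Chars.isIn ['.'] "army".toList = false) ∧
    (PySem.Chars.isIn ['.'] "navy".toList = false) ∧
    (PySem.Chars.isIn ['.'] "airforce".toList = false) ∧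
    (PySem.Chars.isIn ['.'] "mil".toList = false) ∧
    (PySem.Chars.isIn ['.'] "sncorp.com".toList = true) ∧
    (PySem.Chars.isIn ['.'] "sierranevadacorp.us".toList = true) ∧
    (PySem.Chars.isIn ['.'] "ncontext.com".toList = true) := by decide

theorem pvA_iff (s : List Char) :
    pvMilLoop pvMilDomains s = true ↔
      ∃ t ∈ pvSuffixes, ((t ++ ['"']) <:+: s ∨ (t ++ ['/']) <:+: s) := by
  obtain ⟨h1, h2, h3, h4, h5, h6, h7⟩ := pv_dotless
  simp only [pvMilDomains, pvMilLoop, h1, h2, h3, h4, h5, h6, h7, Bool.not_false,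
    Bool.not_true, if_true, Bool.if_true_left,
    Bool.or_eq_true, PySem.Chars.isIn_iff_infix]
  simp only [pvSuffixes, List.mem_cons, List.not_mem_nil, or_false, exists_eq_or_imp,
    exists_eq_left]
  have e1 : ['.'] ++ "army".toList = ".army".toList := by decide
  have e2 : ['.'] ++ "navy".toList = ".navy".toList := by decide
  have e3 : ['.'] ++ "airforce".toList = ".airforce".toList := by decide
  have e4 : ['.'] ++ "mil".toList = ".mil".toList := by decide
  simp only [e1, e2, e3, e4, Bool.false_eq_true, if_false, Bool.or_false,
    decide_eq_true_eq, Bool.or_eq_true]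

theorem pvAlt_iff (rest : List Char) : ∀ pre,
    pvAltLoop pre rest = true ↔
      ∃ i d, rest[i]? = some d ∧ (d = '"' ∨ d = '/') ∧
        ∃ t ∈ pvSuffixes, t <:+ (pre ++ rest.take i) := by
  induction rest with
  | nil => intro pre; simp [pvAltLoop]
  | cons c cs ih =>
    intro pre
    by_cases hc : ((c == '"' || c == '/') && pvSuffixes.any (fun t => PySem.Chars.endswith pre t)) = true
    · simp only [pvAltLoop, if_pos hc, true_iff]
      rw [Bool.and_eq_true, Bool.or_eq_true, beq_iff_eq, beq_iff_eq, List.any_eq_true] at hc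
      obtain ⟨hd, t, ht, hend⟩ := hc
      exact ⟨0, c, rfl, hd, t, ht, by simpa using (PySem.Chars.endswith_iff pre t).mp hend⟩
    · simp only [pvAltLoop, if_neg hc]
      rw [ih (pre ++ [c])]
      constructor
      · rintro ⟨i, d, hget, hd, t, ht, hsuf⟩
        refine ⟨i + 1, d, by simpa using hget, hd, t, ht, ?_⟩
        rw [List.take_succ_cons, List.append_cons]
        exact hsuf
      · rintro ⟨i, d, hget, hd, t, ht, hsuf⟩
        cases i with
        | zero =>
          exfalso
          apply hc
          simp only [List.getElem?_cons_zero, Option.some.injEq] at hget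
          subst hget
          rw [Bool.and_eq_true, Bool.or_eq_true, beq_iff_eq, beq_iff_eq, List.any_eq_true]
          refine ⟨hd, t, ht, (PySem.Chars.endswith_iff pre t).mpr (by simpa using hsuf)⟩
        | succ j =>
          rw [List.take_succ_cons, List.append_cons] at hsuf
          exact ⟨j, d, by simpa using hget, hd, t, ht, hsuf⟩

theorem pv_main (s : List Char) :
    pvMilLoop pvMilDomains s = pvAltLoop [] s := by
  rw [Bool.eq_iff_iff, pvA_iff s, pvAlt_iff s []]
  simp only [List.nil_append]
  constructor
  · rintro ⟨t, ht, h | h⟩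
    · obtain ⟨i, hget, hsuf⟩ := (pv_infix_snoc_iff t '"' s).mp h
      exact ⟨i, '"', hget, Or.inl rfl, t, ht, hsuf⟩
    · obtain ⟨i, hget, hsuf⟩ := (pv_infix_snoc_iff t '/' s).mp h
      exact ⟨i, '/', hget, Or.inr rfl, t, ht, hsuf⟩
  · rintro ⟨i, d, hget, hd | hd, t, ht, hsuf⟩ <;> subst hd
    · exact ⟨t, ht, Or.inl ((pv_infix_snoc_iff t '"' s).mpr ⟨i, hget, hsuf⟩)⟩
    · exact ⟨t, ht, Or.inr ((pv_infix_snoc_iff t '/' s).mpr ⟨i, hget, hsuf⟩)⟩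

-- ===== VERDICT (by name: the statement is the Claim_ definition above) =====
theorem contains_military_domain_spec : Claim_equal_contains_military_domain := by
  intro s _
  unfold Spec_contains_military_domain contains_military_domain contains_military_domain_alt
  exact pv_main s.toList
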